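-- pv_equiv track=rewrite | github.com/Zaine-04/ipsnipe | ipsnipe/scanners/param_lfi_scanner.py | get_best_web_target
-- ===== SOURCE A (Python) =====
-- from typing import Dict, List, Optional
--
-- def get_best_web_target(target_ip: str, web_ports: List[int]) -> Optional[str]:
--     """Get the best web target for parameter testing"""
--     # Prefer HTTP for parameter testing (easier to analyze)
--     for port in [80, 8080, 8000]:
--         if port in web_ports:
--             return f"http://{target_ip}:{port}"
--
--     # Fall back to HTTPS if needed
--     for port in [443, 8443]:
--         if port in web_ports:
--             return f"https://{target_ip}:{port}"
--
--     # Use the first available web port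
--     if web_ports:
--         port = web_ports[0]
--         protocol = 'https' if port in [443, 8443] else 'http'
--         return f"{protocol}://{target_ip}:{port}"
--
--     return None
-- ===== SOURCE B (Python) =====
-- from typing import Dict, List, Optional
--
-- _RANK = {80: 0, 8080: 1, 8000: 2, 443: 3, 8443: 4}
--
-- def get_best_web_target(target_ip: str, web_ports: List[int]) -> Optional[str]:
--     """Get the best web target for parameter testing"""
--     if not web_ports:
--         return None
--     best = min(web_ports, key=lambda p: _RANK.get(p, 9))
--     protocol = 'https' if best in (443, 8443) else 'http'
--     return f"{protocol}://{target_ip}:{best}"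
-- ===== Notes on version B (the rewrite author's own statement) =====
-- stated objective: idiomatic
-- what changed: Replaces the three sequential membership scans and the separate fallback branch with a single stable min over a priority rank (80,8080,8000,443,8443, else sentinel); min's stability reproduces both the preference order and the first-element fallback.
import Mathlib
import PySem

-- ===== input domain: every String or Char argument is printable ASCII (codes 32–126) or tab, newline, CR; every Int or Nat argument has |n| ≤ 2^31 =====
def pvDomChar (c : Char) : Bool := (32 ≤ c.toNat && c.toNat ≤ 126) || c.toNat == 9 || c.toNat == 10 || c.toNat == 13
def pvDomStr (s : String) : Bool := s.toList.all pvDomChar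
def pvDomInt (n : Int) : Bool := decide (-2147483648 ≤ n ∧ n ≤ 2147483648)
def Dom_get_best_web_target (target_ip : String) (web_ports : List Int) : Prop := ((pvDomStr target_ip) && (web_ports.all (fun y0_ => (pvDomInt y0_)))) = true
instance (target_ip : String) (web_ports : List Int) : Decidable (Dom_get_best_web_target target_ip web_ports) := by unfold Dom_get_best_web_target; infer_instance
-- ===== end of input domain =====

-- B replaces A's sequential membership scans and separate fallback with one stable min over a port-priority rank (idiomatic, same cost).


-- ===== PORT A =====
-- A's two literal for-loops over [80,8080,8000] and [443,8443] are unrolled into the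
-- same sequence of membership tests and returns; the fallback branch is as in A.
def get_best_web_target (target_ip : String) (web_ports : List Int) : Option String :=
  if web_ports.contains 80 then some ("http://" ++ target_ip ++ ":" ++ PySem.Int.toStr 80)
  else if web_ports.contains 8080 then some ("http://" ++ target_ip ++ ":" ++ PySem.Int.toStr 8080)
  else if web_ports.contains 8000 then some ("http://" ++ target_ip ++ ":" ++ PySem.Int.toStr 8000)
  else if web_ports.contains 443 then some ("https://" ++ target_ip ++ ":" ++ PySem.Int.toStr 443)
  else if web_ports.contains 8443 then some ("https://" ++ target_ip ++ ":" ++ PySem.Int.toStr 8443)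
  else
    match web_ports with
    | [] => none
    | p :: _ =>
      let protocol := if p = 443 ∨ p = 8443 then "https" else "http"
      some (protocol ++ "://" ++ target_ip ++ ":" ++ PySem.Int.toStr p)

-- ===== PORT B =====
-- Source B's literal 5-entry dict lookup _RANK.get(p, 9), unrolled key by key (exact).
def pvRank (p : Int) : Int :=
  if p = 80 then 0 else if p = 8080 then 1 else if p = 8000 then 2
  else if p = 443 then 3 else if p = 8443 then 4 else 9

def get_best_web_target_alt (target_ip : String) (web_ports : List Int) : Option String :=
  match PySem.List.min? web_ports pvRank with
  | none => none
  | some best =>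
    let protocol := if best = 443 ∨ best = 8443 then "https" else "http"
    some (protocol ++ "://" ++ target_ip ++ ":" ++ PySem.Int.toStr best)

-- ===== PRECONDITION & SPEC =====
def Spec_get_best_web_target (target_ip : String) (web_ports : List Int) (out : Option String) : Prop := out = get_best_web_target_alt target_ip web_ports
instance (target_ip : String) (web_ports : List Int) (out : Option String) : Decidable (Spec_get_best_web_target target_ip web_ports out) := by unfold Spec_get_best_web_target; infer_instance

-- ===== CLAIM (what is proved, stated in full; the proofs are below) =====
def Claim_equal_get_best_web_target : Prop := ∀ (target_ip : String) (web_ports : List Int), Dom_get_best_web_target target_ip web_ports → Spec_get_best_web_target target_ip web_ports (get_best_web_target target_ip web_ports)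

-- ===== LEMMAS AND PROOFS =====

-- the fold behind Python's min(key=...), named once so the lemmas share it
def pvStep (acc : Option Int) (x : Int) : Option Int :=
  match acc with
  | none => some x
  | some m => if pvRank x < pvRank m then some x else some m

theorem min?_eq_fold (ps : List Int) :
    PySem.List.min? ps pvRank = ps.foldl pvStep none := by
  unfold PySem.List.min?
  congr 1
  funext acc x
  cases acc <;> rfl

theorem foldl_pvStep_some_ne_none (l : List Int) : ∀ b : Int, l.foldl pvStep (some b) ≠ none := by
  induction l with
  | nil => intro b; simp
  | cons x t ih =>
    intro b
    simp only [List.foldl, pvStep]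
    split <;> apply ih

theorem pvRank_ne_none {ps : List Int} (h : ps ≠ []) :
    PySem.List.min? ps pvRank ≠ none := by
  cases ps with
  | nil => exact absurd rfl h
  | cons a t =>
    rw [min?_eq_fold]
    simpa only [List.foldl, pvStep] using foldl_pvStep_some_ne_none t a

-- if p ∈ ps has the strictly smallest possible rank r and is the only port of rank r,
-- the stable min is p
theorem min?_eq_of_unique {ps : List Int} {p r : Int}
    (hp : p ∈ ps) (hr : pvRank p = r)
    (hlb : ∀ x ∈ ps, r ≤ pvRank x)
    (huniq : ∀ x, pvRank x = r → x = p) :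
    PySem.List.min? ps pvRank = some p := by
  cases hm : PySem.List.min? ps pvRank with
  | none => exact absurd hm (pvRank_ne_none (by rintro rfl; simp at hp))
  | some m =>
    have h1 : pvRank m ≤ pvRank p := PySem.List.min?_isMin hm p hp
    have h2 : r ≤ pvRank m := hlb m (PySem.List.min?_mem hm)
    have : pvRank m = r := le_antisymm (hr ▸ h1) h2
    rw [huniq m this]

-- if no element strictly beats the accumulator's rank, the fold keeps it
theorem fold_stable {l : List Int} {b : Int}
    (h : ∀ x ∈ l, ¬ pvRank x < pvRank b) :
    l.foldl pvStep (some b) = some b := by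
  induction l with
  | nil => rfl
  | cons x t ih =>
    simp only [List.foldl, pvStep]
    rw [if_neg (h x (by simp))]
    exact ih (fun y hy => h y (by simp [hy]))

set_option maxHeartbeats 1000000 in
theorem get_best_web_target_spec : Claim_equal_get_best_web_target := by
  intro ip ps _
  unfold Spec_get_best_web_target get_best_web_target get_best_web_target_alt
  by_cases h80 : (80 : Int) ∈ ps
  · rw [min?_eq_of_unique h80 rfl
      (fun x _ => by unfold pvRank; split_ifs <;> omega)
      (fun x hx => by unfold pvRank at hx; split_ifs at hx <;> omega)]
    simp [h80]
  · by_cases h8080 : (8080 : Int) ∈ ps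
    · rw [min?_eq_of_unique h8080 rfl
        (fun x hx => by
          have e1 : x ≠ 80 := fun e => h80 (e ▸ hx)
          unfold pvRank; split_ifs <;> omega)
        (fun x hx => by unfold pvRank at hx; split_ifs at hx <;> omega)]
      simp [h80, h8080]
    · by_cases h8000 : (8000 : Int) ∈ ps
      · rw [min?_eq_of_unique h8000 rfl
          (fun x hx => by
            have e1 : x ≠ 80 := fun e => h80 (e ▸ hx)
            have e2 : x ≠ 8080 := fun e => h8080 (e ▸ hx)
            unfold pvRank; split_ifs <;> omega)
          (fun x hx => by unfold pvRank at hx; split_ifs at hx <;> omega)]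
        simp [h80, h8080, h8000]
      · by_cases h443 : (443 : Int) ∈ ps
        · rw [min?_eq_of_unique h443 rfl
            (fun x hx => by
              have e1 : x ≠ 80 := fun e => h80 (e ▸ hx)
              have e2 : x ≠ 8080 := fun e => h8080 (e ▸ hx)
              have e3 : x ≠ 8000 := fun e => h8000 (e ▸ hx)
              unfold pvRank; split_ifs <;> omega)
            (fun x hx => by unfold pvRank at hx; split_ifs at hx <;> omega)]
          simp [h80, h8080, h8000, h443]
        · by_cases h8443 : (8443 : Int) ∈ ps
          · rw [min?_eq_of_unique h8443 rfl
              (fun x hx => by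
                have e1 : x ≠ 80 := fun e => h80 (e ▸ hx)
                have e2 : x ≠ 8080 := fun e => h8080 (e ▸ hx)
                have e3 : x ≠ 8000 := fun e => h8000 (e ▸ hx)
                have e4 : x ≠ 443 := fun e => h443 (e ▸ hx)
                unfold pvRank; split_ifs <;> omega)
              (fun x hx => by unfold pvRank at hx; split_ifs at hx <;> omega)]
            simp [h80, h8080, h8000, h443, h8443]
          · -- no preferred port present: min is the first element (stability)
            cases ps with
            | nil => simp [PySem.List.min?]
            | cons a t =>
              have hr9 : ∀ x ∈ a :: t, pvRank x = 9 := by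
                intro x hx
                have e1 : x ≠ 80 := fun e => h80 (e ▸ hx)
                have e2 : x ≠ 8080 := fun e => h8080 (e ▸ hx)
                have e3 : x ≠ 8000 := fun e => h8000 (e ▸ hx)
                have e4 : x ≠ 443 := fun e => h443 (e ▸ hx)
                have e5 : x ≠ 8443 := fun e => h8443 (e ▸ hx)
                unfold pvRank; split_ifs <;> omega
              have hall : ∀ x ∈ a :: t, ¬ pvRank x < pvRank a := by
                intro x hx
                rw [hr9 x hx, hr9 a List.mem_cons_self]
                omega
              have hmin : PySem.List.min? (a :: t) pvRank = some a := by
                rw [min?_eq_fold]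
                simp only [List.foldl, pvStep]
                exact fold_stable (fun x hx => hall x (List.mem_cons_of_mem a hx))
              rw [hmin]
              have hna : ¬ ((a : Int) = 443 ∨ a = 8443) := by
                rintro (rfl | rfl)
                · exact h443 List.mem_cons_self
                · exact h8443 List.mem_cons_self
              simp [h80, h8080, h8000, h443, h8443, hna]
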